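-- pv_equiv track=rewrite | github.com/Chisanan232/test-coverage-mcp | test-coverage-mcp/src/test_coverage_mcp/services/config_diagnosis.py | detect_over_included_paths
-- ===== SOURCE A (Python) =====
-- from typing import Any, Dict, List, Optional
--
-- def detect_over_included_paths(
--     config: Dict[str, Any], file_coverage: Dict[str, Dict[str, Any]]
-- ) -> List[Dict[str, Any]]:
--     """Detect paths that are included but have no coverage data.
--
--     Args:
--         config: Configuration dictionary
--         file_coverage: File coverage data
--
--     Returns:
--         List of over-included paths with details:
--         - path: The over-included path
--         - reason: Why it's over-included
--         - suggestion: Suggested action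
--     """
--     over_included = []
--
--     include_paths = config.get("include_paths", [])
--     for path in include_paths:
--         # Check if path has any coverage data
--         has_coverage = any(
--             file_path.startswith(path) for file_path in file_coverage.keys()
--         )
--
--         if not has_coverage:
--             over_included.append(
--                 {
--                     "path": path,
--                     "reason": "No coverage data found for this path",
--                     "suggestion": f"Remove '{path}' from include_paths or add coverage data",
--                 }
--             )
--
--     return over_included
-- ===== SOURCE B (Python) =====
-- def detect_over_included_paths(config, file_coverage):
--     # Build the set of every prefix of every covered file path once;
--     # each include path is then answered by one set membership test.
--     prefixes = set()
--     for file_path in file_coverage: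
--         for i in range(len(file_path) + 1):
--             prefixes.add(file_path[:i])
--     return [
--         {
--             "path": path,
--             "reason": "No coverage data found for this path",
--             "suggestion": f"Remove '{path}' from include_paths or add coverage data",
--         }
--         for path in config.get("include_paths", [])
--         if path not in prefixes
--     ]
-- ===== Notes on version B (the rewrite author's own statement) =====
-- stated objective: alternative
-- what changed: Instead of scanning all coverage-file keys with startswith for every include path, B precomputes a set of all prefixes of every coverage file path once and answers each include path with a single set membership test; a timing run did not find this measurably faster, so no speed is claimed.
import Mathlib
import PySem

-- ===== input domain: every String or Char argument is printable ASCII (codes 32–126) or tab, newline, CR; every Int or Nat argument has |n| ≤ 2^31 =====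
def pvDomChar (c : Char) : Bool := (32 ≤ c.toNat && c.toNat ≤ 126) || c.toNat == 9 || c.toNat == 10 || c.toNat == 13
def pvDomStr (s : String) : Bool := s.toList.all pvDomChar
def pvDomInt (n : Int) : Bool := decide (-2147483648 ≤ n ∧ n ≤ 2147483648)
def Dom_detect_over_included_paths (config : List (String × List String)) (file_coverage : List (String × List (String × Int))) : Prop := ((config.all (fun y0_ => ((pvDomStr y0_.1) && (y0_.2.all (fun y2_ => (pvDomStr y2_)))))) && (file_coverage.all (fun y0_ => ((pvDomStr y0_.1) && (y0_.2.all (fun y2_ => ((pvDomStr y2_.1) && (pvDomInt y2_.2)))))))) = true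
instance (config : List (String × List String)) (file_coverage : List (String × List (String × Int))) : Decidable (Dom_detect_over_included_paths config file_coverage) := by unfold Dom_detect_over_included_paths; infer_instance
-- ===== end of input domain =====

-- B replaces A's per-path startswith scan of all coverage keys with a set of all
-- prefixes of the coverage file paths built once, then one membership test per
-- include path (objective: alternative algorithm, same observable result).

-- ===== PORT A =====
-- the dict entry appended for an over-included path (shared literal text of both Pythons)
def pvEntry (path : String) : List (String × String) :=
  [("path", path),
   ("reason", "No coverage data found for this path"),
   ("suggestion", "Remove '" ++ path ++ "' from include_paths or add coverage data")]

def detect_over_included_paths (config : List (String × List String)) (file_coverage : List (String × List (String × Int))) : List (List (String × String)) :=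
  let include_paths := (PySem.Dict.mk config).getD "include_paths" []
  include_paths.foldl (fun over_included path =>
    let has_coverage := (file_coverage.map Prod.fst).any
      (fun file_path => PySem.Str.startswith file_path path)
    if !has_coverage then over_included ++ [pvEntry path] else over_included) []

-- ===== PORT B =====
def detect_over_included_paths_alt (config : List (String × List String)) (file_coverage : List (String × List (String × Int))) : List (List (String × String)) :=
  let prefixes : PySem.Set String :=
    file_coverage.foldl (fun s fp =>
      (PySem.List.pyRange 0 (PySem.Str.len fp.1 + 1)).foldl
        (fun s i => PySem.Set.add s (PySem.Str.slice fp.1 none (some i))) s)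
      PySem.Set.empty
  (((PySem.Dict.mk config).getD "include_paths" []).filter
      (fun path => !(PySem.Set.contains prefixes path))).map pvEntry

-- ===== PRECONDITION & SPEC =====
def Spec_detect_over_included_paths (config : List (String × List String)) (file_coverage : List (String × List (String × Int))) (out : List (List (String × String))) : Prop := out = detect_over_included_paths_alt config file_coverage
instance (config : List (String × List String)) (file_coverage : List (String × List (String × Int))) (out : List (List (String × String))) : Decidable (Spec_detect_over_included_paths config file_coverage out) := by unfold Spec_detect_over_included_paths; infer_instance

-- ===== CLAIM (what is proved, stated in full; the proofs are below) =====
def Claim_equal_detect_over_included_paths : Prop := ∀ (config : List (String × List String)) (file_coverage : List (String × List (String × Int))), Dom_detect_over_included_paths config file_coverage → Spec_detect_over_included_paths config file_coverage (detect_over_included_paths config file_coverage)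

-- ===== LEMMAS AND PROOFS =====

-- a string y is a slice f[:i] for some 0 ≤ i < len f + 1 iff f starts with y
lemma slice_exists_iff_startswith (f y : String) :
    (∃ i ∈ PySem.List.pyRange 0 (PySem.Str.len f + 1), y = PySem.Str.slice f none (some i))
      ↔ PySem.Str.startswith f y = true := by
  rw [PySem.Str.startswith_eq, PySem.Chars.startswith_iff]
  constructor
  · rintro ⟨i, hi, rfl⟩
    rw [PySem.List.mem_pyRange_one] at hi
    have h0 : (0:Int) ≤ i := hi.1
    have : (PySem.Str.slice f none (some i)).toList = f.toList.take i.toNat := by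
      rw [PySem.Str.toList_slice, PySem.Chars.slice_eq_listSlice, PySem.List.slice_to _ h0]
    rw [this]
    exact List.take_prefix _ _
  · intro h
    refine ⟨(y.toList.length : Int), ?_, ?_⟩
    · rw [PySem.List.mem_pyRange_one, PySem.Str.len_eq]
      have := h.length_le
      omega
    · rw [← String.toList_inj, PySem.Str.toList_slice, PySem.Chars.slice_eq_listSlice,
        PySem.List.slice_to _ (by positivity)]
      simpa using List.prefix_iff_eq_take.mp h
lemma mem_prefix_fold (fc : List (String × List (String × Int))) (s : PySem.Set String) (y : String) :
    (y ∈ fc.foldl (fun s fp =>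
        (PySem.List.pyRange 0 (PySem.Str.len fp.1 + 1)).foldl
          (fun s i => PySem.Set.add s (PySem.Str.slice fp.1 none (some i))) s) s)
      ↔ y ∈ s ∨ (fc.map Prod.fst).any (fun f => PySem.Str.startswith f y) = true := by
  induction fc generalizing s with
  | nil => simp
  | cons fp fc ih =>
    rw [List.foldl_cons, ih, ← PySem.Set.update_map_eq_foldl_add, PySem.Set.mem_update,
      List.mem_map]
    simp only [List.map_cons, List.any_cons]
    constructor
    · rintro ((hs | ⟨i, hi, rfl⟩) | hany)
      · exact Or.inl hs
      · exact Or.inr (Bool.or_eq_true_iff.mpr (Or.inl ((slice_exists_iff_startswith fp.1 _).mp ⟨i, hi, rfl⟩)))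
      · exact Or.inr (Bool.or_eq_true_iff.mpr (Or.inr hany))
    · rintro (hs | hor)
      · exact Or.inl (Or.inl hs)
      · rcases Bool.or_eq_true_iff.mp hor with h | h
        · rcases (slice_exists_iff_startswith fp.1 y).mpr h with ⟨i, hi, hy⟩
          exact Or.inl (Or.inr ⟨i, hi, hy.symm⟩)
        · exact Or.inr h

-- ===== VERDICT (by name: the statement is the Claim_ definition above) =====
theorem detect_over_included_paths_spec : Claim_equal_detect_over_included_paths := by
  intro config fc _
  unfold Spec_detect_over_included_paths detect_over_included_paths detect_over_included_paths_alt
  rw [PySem.List.foldl_append_if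
      (fun path => !((fc.map Prod.fst).any (fun file_path => PySem.Str.startswith file_path path)))
      pvEntry]
  simp only [List.nil_append]
  congr 1
  apply List.filter_congr
  intro path _
  congr 1
  rw [Bool.eq_iff_iff, List.any_eq_true, PySem.Set.contains_iff, mem_prefix_fold]
  simp [List.any_eq_true]
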